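-- pv_equiv track=rewrite | github.com/williamtrang/DSC20 | homeworks/HW06/HW06.py | corrupt_list
-- ===== SOURCE A (Python) =====
-- def corrupt_string(input, to_insert):
--     """
--     Takes in a base string input and another string to_insert.
--     Corrupts the base string by making it so each character is
--     followed by the string in to_insert and returns.
--
--     Parameters:
--         input: Base string that will be corrupted/modified.
--         to_insert: String that is used to corrupt the base string.
--     Returns:
--         String input that has been corrupted by to_insert.
--
--     >>> corrupt_string('tickets', '#')
--     't#i#c#k#e#t#s#'
--     >>> corrupt_string('', '@')
--     ''
--     >>> corrupt_string('buy now', '-')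
--     'b-u-y- -n-o-w-'
--
--     # Add AT LEAST 3 doctests below, DO NOT delete this line
--     >>> corrupt_string('foo', 'bar')
--     'fbarobarobar'
--     """
--     if len(input) == 0:
--         return input
--     elif len(input) == 1:
--         return input + to_insert
--     return corrupt_string(input[0], to_insert) + corrupt_string(input[1:], to_insert)
--
-- def corrupt_list(lst, word, to_insert):
--     """
--     Takes in a list of strings, a string word to look for, and
--     a string to_insert that will be used to corrupt instances
--     of word in the list. Corrupts the strings in the list
--     that are equal to word by adding to_insert after every
--     character and returns the list.
--
--     Parameters:
--         lst: List of strings that will be corrupted.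
--         word: Word that will be corrupted in the list.
--         to_insert: String that is used to corrupt the matching
--         words in the list.
--     Returns:
--         List of strings with strings equal to word being corrupted.
--
--     >>> corrupt_list(['tickets'], 'tickets','#')
--     ['t#i#c#k#e#t#s#']
--     >>> corrupt_list([], 'tickets','@')
--     []
--     >>> corrupt_list(['buy now', 'tickets'], 'tickets','-')
--     ['buy now', 't-i-c-k-e-t-s-']
--     >>> corrupt_list(['buy now', 'fake tickets'], 'tickets','-')
--     ['buy now', 'fake tickets']
--     >>> corrupt_list(['e-ticket', 'TiCkeTs'], 'tickets','-')
--     ['e-ticket', 'TiCkeTs']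
--
--     # Add AT LEAST 3 doctests below, DO NOT delete this line
--     >>> corrupt_list(['foo', 'food', 'Foo', 'foo'], 'foo', '1')
--     ['f1o1o1', 'food', 'Foo', 'f1o1o1']
--
--     >>> corrupt_list(['foo', 'food', 'Foo', 'foo', '', 'fooD'], 'foo', '1')
--     ['f1o1o1', 'food', 'Foo', 'f1o1o1', '', 'fooD']
--
--     >>> corrupt_list(['', 'Foo', ''], '', ',')
--     ['', 'Foo', '']
--     """
--     if len(lst) <= 1:
--         try:
--             if lst[0] == word:
--                 return [corrupt_string(lst[0], to_insert)]
--             return [lst[0]]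
--         except:
--             return []
--     return corrupt_list([lst[0]], word, to_insert) + corrupt_list(lst[1:], word, to_insert)
-- ===== SOURCE B (Python) =====
-- def corrupt_list(lst, word, to_insert):
--     result = []
--     for s in lst:
--         if s == word:
--             corrupted = ""
--             for c in s:
--                 corrupted += c + to_insert
--             result.append(corrupted)
--         else:
--             result.append(s)
--     return result
-- ===== Notes on version B (the rewrite author's own statement) =====
-- stated objective: simpler
-- what changed: Replaced A's binary head/tail recursion (both list split and per-character string split with a try/except for the empty list) by a single iterative pass with accumulators: one for-loop over the list and one accumulator loop over the characters of a matching word.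
import Mathlib
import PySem

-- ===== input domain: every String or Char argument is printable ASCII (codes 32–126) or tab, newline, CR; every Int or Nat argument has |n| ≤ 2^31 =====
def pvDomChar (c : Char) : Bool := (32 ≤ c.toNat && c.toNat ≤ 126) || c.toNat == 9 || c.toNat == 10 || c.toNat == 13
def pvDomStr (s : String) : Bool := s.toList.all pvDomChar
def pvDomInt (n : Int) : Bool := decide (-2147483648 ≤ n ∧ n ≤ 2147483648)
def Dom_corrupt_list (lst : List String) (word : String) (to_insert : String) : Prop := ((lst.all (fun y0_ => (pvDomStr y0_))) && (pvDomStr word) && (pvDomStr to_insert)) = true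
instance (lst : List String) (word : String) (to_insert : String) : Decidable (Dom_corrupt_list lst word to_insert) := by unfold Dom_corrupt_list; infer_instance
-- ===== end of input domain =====

-- B replaces A's binary head/tail recursions (with try/except) by one iterative pass with accumulator loops; objective: simpler.

-- ===== PORT A =====
-- corrupt_string: recursion on the characters, splitting input[0] / input[1:] exactly as A does
def corrupt_string_A (input : List Char) (to_insert : List Char) : List Char :=
  match input with
  | [] => []                                            -- len == 0: return input
  | [c] => [c] ++ to_insert                             -- len == 1: return input + to_insert
  | c :: d :: t => corrupt_string_A [c] to_insert ++ corrupt_string_A (d :: t) to_insert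
termination_by input.length
decreasing_by all_goals (simp; try omega)

-- corrupt_list: the len(lst) <= 1 branch (try/except on lst[0]) is the [] / [x] cases
def corrupt_list (lst : List String) (word : String) (to_insert : String) : List String :=
  match lst with
  | [] => []                                            -- lst[0] raises IndexError, except: return []
  | [x] => if x = word then [String.mk (corrupt_string_A x.toList to_insert.toList)] else [x]
  | x :: y :: t => corrupt_list [x] word to_insert ++ corrupt_list (y :: t) word to_insert
termination_by lst.length
decreasing_by all_goals (simp; try omega)

-- ===== PORT B =====
-- iterative character loop: corrupted += c + to_insert
def corrupt_string_B (s : List Char) (to_insert : List Char) : List Char :=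
  s.foldl (fun acc c => acc ++ ([c] ++ to_insert)) []

-- iterative list loop building result
def corrupt_list_alt (lst : List String) (word : String) (to_insert : String) : List String :=
  lst.foldl (fun acc s =>
    acc ++ [if s = word then String.mk (corrupt_string_B s.toList to_insert.toList) else s]) []

-- ===== PRECONDITION & SPEC =====
def Spec_corrupt_list (lst : List String) (word : String) (to_insert : String) (out : List String) : Prop := out = corrupt_list_alt lst word to_insert
instance (lst : List String) (word : String) (to_insert : String) (out : List String) : Decidable (Spec_corrupt_list lst word to_insert out) := by unfold Spec_corrupt_list; infer_instance

-- ===== CLAIM (what is proved, stated in full; the proofs are below) =====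
def Claim_equal_corrupt_list : Prop := ∀ (lst : List String) (word : String) (to_insert : String), Dom_corrupt_list lst word to_insert → Spec_corrupt_list lst word to_insert (corrupt_list lst word to_insert)

-- ===== LEMMAS AND PROOFS =====
theorem foldl_snoc_append {α β : Type} (g : α → List β) (s : List α) (acc : List β) :
    s.foldl (fun a c => a ++ g c) acc = acc ++ s.flatMap g := by
  induction s generalizing acc with
  | nil => simp
  | cons c t ih => simp [ih]

theorem corrupt_string_A_eq_flatMap (s ins : List Char) :
    corrupt_string_A s ins = s.flatMap (fun c => [c] ++ ins) := by
  induction s with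
  | nil => simp only [corrupt_string_A]; simp
  | cons c rest ih =>
    cases rest with
    | nil => simp only [corrupt_string_A]; simp
    | cons d t =>
      simp only [corrupt_string_A] at ih ⊢
      simp [ih]

theorem corrupt_string_B_eq_flatMap (s ins : List Char) :
    corrupt_string_B s ins = s.flatMap (fun c => [c] ++ ins) := by
  unfold corrupt_string_B
  simpa using foldl_snoc_append (fun c => [c] ++ ins) s []

theorem corrupt_list_eq_map (lst : List String) (word to_insert : String) :
    corrupt_list lst word to_insert =
      lst.map (fun s => if s = word then String.mk (corrupt_string_B s.toList to_insert.toList) else s) := by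
  induction lst with
  | nil => simp only [corrupt_list]; simp
  | cons x rest ih =>
    cases rest with
    | nil =>
      simp only [corrupt_list]
      simp [corrupt_string_A_eq_flatMap, corrupt_string_B_eq_flatMap]
      split_ifs <;> simp
    | cons y t =>
      simp only [corrupt_list] at ih ⊢
      simp [ih, corrupt_string_A_eq_flatMap, corrupt_string_B_eq_flatMap]
      split_ifs <;> simp

theorem corrupt_list_alt_eq_map (lst : List String) (word to_insert : String) :
    corrupt_list_alt lst word to_insert =
      lst.map (fun s => if s = word then String.mk (corrupt_string_B s.toList to_insert.toList) else s) := by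
  unfold corrupt_list_alt
  rw [foldl_snoc_append]
  simp only [List.nil_append]
  induction lst with
  | nil => simp
  | cons x t ih => simp [ih]

-- ===== VERDICT (by name: the statement is the Claim_ definition above) =====
theorem corrupt_list_spec : Claim_equal_corrupt_list := by
  intro lst word to_insert _
  unfold Spec_corrupt_list
  rw [corrupt_list_eq_map, corrupt_list_alt_eq_map]
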